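-- pv_equiv track=rewrite | github.com/gesture02/Algorithm | 백준/20327.py | r8
-- ===== SOURCE A (Python) =====
-- def r8(p, l):
--     n = len(p)
--     a = [[0] * n for _ in range(n)]
--     subSize = (1 << l)
--     subCount = n // subSize
--     for i in range(subCount):
--         for j in range(subCount):
--             sx1 = i * subSize
--             sy1 = j * subSize
--             sx2 = j * subSize
--             sy2 = (subCount-1-i) * subSize
--             for x in range(subSize):
--                 for y in range(subSize):
--                     a[sx1+x][sy1+y] = p[sx2+x][sy2+y]
--     return a
-- ===== SOURCE B (Python) =====
-- def r8(p, l):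
--     n = len(p)
--     subSize = 1 << l
--     subCount = n // subSize
--     m = subCount * subSize
--     # partition the covered m x m area of p into a subCount x subCount grid of tiles
--     block = [[[row[bj * subSize:(bj + 1) * subSize]
--                for row in p[bi * subSize:(bi + 1) * subSize]]
--               for bj in range(subCount)] for bi in range(subCount)]
--     # rotate the grid of tiles 90 degrees counter-clockwise
--     rotated = [[block[j][subCount - 1 - i] for j in range(subCount)]
--                for i in range(subCount)]
--     # reassemble the core by concatenating tile rows, then embed it in the n x n frame
--     core = [[v for blk in blockRow for v in blk[x]]
--             for blockRow in rotated for x in range(subSize)]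
--     pad = [0] * (n - m)
--     return [core[r] + pad if r < m else [0] * n for r in range(n)]
-- ===== Notes on version B (the rewrite author's own statement) =====
-- stated objective: alternative
-- what changed: A preallocates an n x n zero grid and copies cell-by-cell with four nested index loops; B partitions the covered square into a grid of tiles by slicing, rotates the tile grid 90 degrees counter-clockwise with comprehensions, reassembles the rows by concatenating tile slices, and embeds the core in the n x n zero frame, never writing single cells.
import Mathlib
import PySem

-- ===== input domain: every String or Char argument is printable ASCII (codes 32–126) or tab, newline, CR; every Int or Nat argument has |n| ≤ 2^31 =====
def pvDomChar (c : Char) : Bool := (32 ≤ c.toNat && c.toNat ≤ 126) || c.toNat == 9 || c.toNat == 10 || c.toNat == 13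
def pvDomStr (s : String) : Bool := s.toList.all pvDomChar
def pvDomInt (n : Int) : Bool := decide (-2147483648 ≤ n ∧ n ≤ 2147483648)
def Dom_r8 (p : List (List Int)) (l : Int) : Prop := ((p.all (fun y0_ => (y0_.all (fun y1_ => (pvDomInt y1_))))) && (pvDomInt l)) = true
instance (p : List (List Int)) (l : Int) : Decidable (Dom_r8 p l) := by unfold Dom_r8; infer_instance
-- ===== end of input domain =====

-- B re-implements the block rearrangement by partition / rotate / reassemble with slices
-- instead of A's cell-by-cell writes into a preallocated grid; same cost, a different decomposition.

-- ===== PORT A =====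
-- helper for Python "a[r][c] = v" (in-place row assignment)
def setCell (a : List (List Int)) (r c : Int) (v : Int) : List (List Int) :=
  PySem.List.pySetD a r (PySem.List.pySetD (PySem.List.pyGetD a r []) c v)
-- helper for Python "p[r][c]" (read; total form, exact on in-range nonneg indices admitted by Pre_)
def getCell (a : List (List Int)) (r c : Int) : Int :=
  PySem.List.pyGetD (PySem.List.pyGetD a r []) c 0

def r8 (p : List (List Int)) (l : Int) : List (List Int) :=
  let a : List (List Int) := List.replicate p.length (List.replicate p.length 0)
  let subSize : Int := 2 ^ l.toNat   -- 1 << l; exact for 0 ≤ l (Pre_; Python raises for l < 0)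
  let subCount : Int := PySem.Int.floordiv (p.length : Int) subSize
  (PySem.List.pyRange 0 subCount 1).foldl (fun a i =>
    (PySem.List.pyRange 0 subCount 1).foldl (fun a j =>
      let sx1 := i * subSize
      let sy1 := j * subSize
      let sx2 := j * subSize
      let sy2 := (subCount - 1 - i) * subSize
      (PySem.List.pyRange 0 subSize 1).foldl (fun a x =>
        (PySem.List.pyRange 0 subSize 1).foldl (fun a y =>
          setCell a (sx1 + x) (sy1 + y) (getCell p (sx2 + x) (sy2 + y))) a) a) a) a

-- ===== PORT B =====
def r8_alt (p : List (List Int)) (l : Int) : List (List Int) :=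
  let n : Int := p.length
  let subSize : Int := 2 ^ l.toNat   -- 1 << l; exact for 0 ≤ l (Pre_; Python raises for l < 0)
  let subCount : Int := PySem.Int.floordiv n subSize
  let m : Int := subCount * subSize
  -- partition the covered m x m area of p into a subCount x subCount grid of tiles
  let block : List (List (List (List Int))) :=
    (PySem.List.pyRange 0 subCount 1).map (fun bi =>
      (PySem.List.pyRange 0 subCount 1).map (fun bj =>
        (PySem.List.slice p (some (bi * subSize)) (some ((bi + 1) * subSize))).map (fun row =>
          PySem.List.slice row (some (bj * subSize)) (some ((bj + 1) * subSize)))))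
  -- rotate the grid of tiles 90 degrees counter-clockwise
  let rotated : List (List (List (List Int))) :=
    (PySem.List.pyRange 0 subCount 1).map (fun i =>
      (PySem.List.pyRange 0 subCount 1).map (fun j =>
        PySem.List.pyGetD (PySem.List.pyGetD block j []) (subCount - 1 - i) []))
  -- reassemble the core by concatenating tile rows, then embed it in the n x n frame
  let core : List (List Int) :=
    rotated.flatMap (fun blockRow =>
      (PySem.List.pyRange 0 subSize 1).map (fun x =>
        blockRow.flatMap (fun blk => PySem.List.pyGetD blk x [])))
  let pad : List Int := List.replicate (n - m).toNat 0
  (PySem.List.pyRange 0 n 1).map (fun r =>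
    if r < m then PySem.List.pyGetD core r [] ++ pad else List.replicate n.toNat 0)

-- ===== PRECONDITION & SPEC =====
-- Pre_ holds exactly on the inputs where A returns normally: l must be nonnegative (Python's
-- 1 << l raises ValueError for l < 0), and with S = 2^l, C = n // S, m = C*S, the loops read the
-- full top-left m x m square of p, so each of the first m rows must have length >= m
-- (A raises IndexError otherwise).
def Pre_r8 (p : List (List Int)) (l : Int) : Prop :=
  0 ≤ l ∧ ∀ row ∈ p.take (p.length / 2 ^ l.toNat * 2 ^ l.toNat),
    p.length / 2 ^ l.toNat * 2 ^ l.toNat ≤ row.length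
instance (p : List (List Int)) (l : Int) : Decidable (Pre_r8 p l) := by unfold Pre_r8; infer_instance

def pvWitness_r8 : List (List Int) × Int := ([[1, 2], [3, 4]], 1)

def Spec_r8 (p : List (List Int)) (l : Int) (out : List (List Int)) : Prop := out = r8_alt p l
instance (p : List (List Int)) (l : Int) (out : List (List Int)) : Decidable (Spec_r8 p l out) := by unfold Spec_r8; infer_instance

-- ===== CLAIM (what is proved, stated in full; the proofs are below) =====
def Claim_equal_r8 : Prop := ∀ (p : List (List Int)) (l : Int), Dom_r8 p l → Pre_r8 p l → Spec_r8 p l (r8 p l)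

-- ===== LEMMAS AND PROOFS =====

-- the cell value both programs place at position (r, c) of the output
def cellVal (p : List (List Int)) (Sn Cn r c : Nat) : Int :=
  (p.getD ((c / Sn) * Sn + r % Sn) []).getD ((Cn - 1 - r / Sn) * Sn + c % Sn) 0

-- generic: a doubly nested foldl is a foldl over the pair list
theorem foldl_foldl {α β σ : Type} (M : List β) (f : σ → α → β → σ) :
    ∀ (L : List α) (s : σ),
      L.foldl (fun s x => M.foldl (fun s y => f s x y) s) s
        = (L.flatMap (fun x => M.map (fun y => (x, y)))).foldl (fun s q => f s q.1 q.2) s := by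
  intro L
  induction L with
  | nil => intro s; simp
  | cons x L ih => intro s; simp [List.foldl_append, List.foldl_map, ih]

def quadList (RC RS : List Int) : List (((Int × Int) × Int) × Int) :=
  ((RC.flatMap fun i => RC.map fun j => (i, j)).flatMap fun q =>
      RS.map fun x => (q, x)).flatMap fun t => RS.map fun y => (t, y)

theorem quad_fold_eq (RC RS : List Int) (g : List (List Int) → Int → Int → Int → Int → List (List Int))
    (a0 : List (List Int)) :
    RC.foldl (fun a i => RC.foldl (fun a j =>
        RS.foldl (fun a x => RS.foldl (fun a y => g a i j x y) a) a) a) a0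
      = (quadList RC RS).foldl (fun a u => g a u.1.1.1 u.1.1.2 u.1.2 u.2) a0 := by
  calc RC.foldl (fun a i => RC.foldl (fun a j =>
        RS.foldl (fun a x => RS.foldl (fun a y => g a i j x y) a) a) a) a0
      = (RC.flatMap fun i => RC.map fun j => (i, j)).foldl
          (fun s q => RS.foldl (fun s x => RS.foldl (fun s y => g s q.1 q.2 x y) s) s) a0 :=
        foldl_foldl RC _ RC a0
    _ = ((RC.flatMap fun i => RC.map fun j => (i, j)).flatMap fun q => RS.map fun x => (q, x)).foldl
          (fun s t => RS.foldl (fun s y => g s t.1.1 t.1.2 t.2 y) s) a0 :=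
        foldl_foldl RS _ _ a0
    _ = (quadList RC RS).foldl (fun a u => g a u.1.1.1 u.1.1.2 u.1.2 u.2) a0 :=
        foldl_foldl RS _ _ a0

theorem mem_quadList {RC RS : List Int} {u : ((Int × Int) × Int) × Int} :
    u ∈ quadList RC RS ↔ u.1.1.1 ∈ RC ∧ u.1.1.2 ∈ RC ∧ u.1.2 ∈ RS ∧ u.2 ∈ RS := by
  obtain ⟨⟨⟨i, j⟩, x⟩, y⟩ := u
  simp [quadList, List.mem_flatMap]
  aesop

theorem length_setCell (a : List (List Int)) (r c v : Int) : (setCell a r c v).length = a.length := by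
  simp [setCell, PySem.List.length_pySetD]

theorem row_setCell (a : List (List Int)) (r c v : Int) (k : Int) (hr : 0 ≤ r) (hc : 0 ≤ c) (hk : 0 ≤ k) :
    (PySem.List.pyGetD (setCell a r c v) k []).length = (PySem.List.pyGetD a k []).length := by
  simp only [setCell, PySem.List.pySetD_of_nonneg _ _ hc, PySem.List.pySetD_of_nonneg _ _ hr,
    PySem.List.pyGetD_of_nonneg _ _ hk, PySem.List.pyGetD_of_nonneg _ _ hr,
    List.getD_eq_getElem?_getD, List.getElem?_set, List.length_set]
  split_ifs with h1 h2
  · simp [h1.symm, List.getElem?_eq_getElem h2, List.length_set]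
  · simp [List.getElem?_eq_none (show a.length ≤ k.toNat by omega)]
  · rfl

theorem getCell_setCell_self (a : List (List Int)) (r c v : Int) (hr0 : 0 ≤ r) (hc0 : 0 ≤ c)
    (hr : r.toNat < a.length) (hc : c.toNat < (PySem.List.pyGetD a r []).length) :
    getCell (setCell a r c v) r c = v := by
  rw [PySem.List.pyGetD_of_nonneg _ _ hr0] at hc
  simp only [getCell, setCell, PySem.List.pySetD_of_nonneg _ _ hc0, PySem.List.pySetD_of_nonneg _ _ hr0,
    PySem.List.pyGetD_of_nonneg _ _ hr0, PySem.List.pyGetD_of_nonneg _ _ hc0,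
    List.getD_eq_getElem?_getD, List.getElem?_set]
  simp only [eq_self_iff_true, if_true, if_pos hr, Option.getD_some]
  have hc' : c.toNat < ((a[r.toNat]?.getD []).set c.toNat v).length := by
    rw [List.length_set]
    rwa [List.getD_eq_getElem?_getD] at hc
  rw [List.getElem?_eq_getElem hc', Option.getD_some, List.getElem_set_self]

theorem getCell_setCell_ne (a : List (List Int)) (r' c' r c v : Int) (hr' : 0 ≤ r') (hc' : 0 ≤ c')
    (hr : 0 ≤ r) (hc : 0 ≤ c) (hne : ¬(r' = r ∧ c' = c)) :
    getCell (setCell a r' c' v) r c = getCell a r c := by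
  simp only [getCell, setCell, PySem.List.pySetD_of_nonneg _ _ hc', PySem.List.pySetD_of_nonneg _ _ hr',
    PySem.List.pyGetD_of_nonneg _ _ hr', PySem.List.pyGetD_of_nonneg _ _ hr,
    PySem.List.pyGetD_of_nonneg _ _ hc,
    List.getD_eq_getElem?_getD, List.getElem?_set]
  by_cases hrr : r'.toNat = r.toNat
  · have hrr' : r' = r := by omega
    have hcc : ¬ c'.toNat = c.toNat := by
      have : ¬ c' = c := fun h => hne ⟨hrr', h⟩
      omega
    by_cases hlen : r'.toNat < a.length
    · simp only [hrr, eq_self_iff_true, if_true, if_pos (hrr ▸ hlen), Option.getD_some,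
        List.getElem?_set, if_neg hcc]
    · simp [hrr, if_neg (hrr ▸ hlen), List.getElem?_eq_none (show a.length ≤ r.toNat by omega)]
  · simp [hrr]

theorem foldl_setCell_length {υ : Type} (tr tc tv : υ → Int) :
    ∀ (U : List υ) (a : List (List Int)),
      (U.foldl (fun a u => setCell a (tr u) (tc u) (tv u)) a).length = a.length := by
  intro U
  induction U with
  | nil => intro a; rfl
  | cons u U ih => intro a; simp [List.foldl_cons, ih, length_setCell]

theorem foldl_setCell_rowlen {υ : Type} (tr tc tv : υ → Int) (k : Int) (hk : 0 ≤ k) :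
    ∀ (U : List υ) (a : List (List Int)), (∀ u ∈ U, 0 ≤ tr u ∧ 0 ≤ tc u) →
      (PySem.List.pyGetD (U.foldl (fun a u => setCell a (tr u) (tc u) (tv u)) a) k []).length
        = (PySem.List.pyGetD a k []).length := by
  intro U
  induction U with
  | nil => intro a _; rfl
  | cons u U ih =>
      intro a hU
      simp only [List.foldl_cons]
      rw [ih _ (fun u hu => hU u (List.mem_cons_of_mem _ hu)),
        row_setCell _ _ _ _ _ (hU u (List.mem_cons_self)).1 (hU u (List.mem_cons_self)).2 hk]

theorem getCell_foldl_no_target {υ : Type} (tr tc tv : υ → Int) (r c : Int) (hr : 0 ≤ r) (hc : 0 ≤ c) :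
    ∀ (U : List υ) (a : List (List Int)),
      (∀ u ∈ U, 0 ≤ tr u ∧ 0 ≤ tc u ∧ ¬(tr u = r ∧ tc u = c)) →
      getCell (U.foldl (fun a u => setCell a (tr u) (tc u) (tv u)) a) r c = getCell a r c := by
  intro U
  induction U with
  | nil => intro a _; rfl
  | cons u U ih =>
      intro a hU
      obtain ⟨h1, h2, h3⟩ := hU u List.mem_cons_self
      simp only [List.foldl_cons]
      rw [ih _ (fun u hu => hU u (List.mem_cons_of_mem _ hu)),
        getCell_setCell_ne a _ _ _ _ _ h1 h2 hr hc h3]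

theorem getCell_foldl_unique {υ : Type} (tr tc tv : υ → Int) (r c : Int) (hr0 : 0 ≤ r) (hc0 : 0 ≤ c) :
    ∀ (U : List υ) (a : List (List Int)) (u0 : υ), u0 ∈ U →
      (∀ u ∈ U, 0 ≤ tr u ∧ 0 ≤ tc u) →
      (∀ u ∈ U, (tr u = r ∧ tc u = c) ↔ u = u0) →
      r.toNat < a.length → c.toNat < (PySem.List.pyGetD a r []).length →
      getCell (U.foldl (fun a u => setCell a (tr u) (tc u) (tv u)) a) r c = tv u0 := by
  intro U
  induction U with
  | nil => intro a u0 h; simp at h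
  | cons u U ih =>
      intro a u0 hmem hnn huniq hra hca
      simp only [List.foldl_cons]
      by_cases hu0 : u0 ∈ U
      · apply ih _ u0 hu0 (fun w hw => hnn w (List.mem_cons_of_mem _ hw))
          (fun w hw => huniq w (List.mem_cons_of_mem _ hw))
        · rw [length_setCell]; exact hra
        · rw [row_setCell _ _ _ _ _ (hnn u List.mem_cons_self).1 (hnn u List.mem_cons_self).2 hr0]
          exact hca
      · have hu : u = u0 := by
          rcases List.mem_cons.mp hmem with h | h
          · exact h.symm
          · exact absurd h hu0
        subst hu
        have htys : tr u = r ∧ tc u = c := (huniq u List.mem_cons_self).mpr rfl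
        have hnot : ∀ w ∈ U, ¬(tr w = r ∧ tc w = c) := by
          intro w hw hts
          exact hu0 ((huniq w (List.mem_cons_of_mem _ hw)).mp hts ▸ hw)
        rw [getCell_foldl_no_target tr tc tv r c hr0 hc0 U _
          (fun w hw => ⟨(hnn w (List.mem_cons_of_mem _ hw)).1, (hnn w (List.mem_cons_of_mem _ hw)).2, hnot w hw⟩)]
        rw [htys.1, htys.2]
        exact getCell_setCell_self a r c _ hr0 hc0 hra hca

-- generic flatMap indexing when all pieces have the same length
theorem length_flatMap_uniform {α β : Type} (f : α → List β) (S : Nat) :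
    ∀ (L : List α), (∀ x ∈ L, (f x).length = S) → (L.flatMap f).length = L.length * S := by
  intro L
  induction L with
  | nil => intro _; simp
  | cons x L ih =>
      intro h
      simp only [List.flatMap_cons, List.length_append, List.length_cons,
        ih (fun x hx => h x (List.mem_cons_of_mem _ hx)), h x List.mem_cons_self]
      ring

theorem getD_flatMap_uniform {α β : Type} (f : α → List β) (S : Nat) (hS : 0 < S) (dα : α) (d : β) :
    ∀ (L : List α) (k : Nat), k < L.length * S → (∀ x ∈ L, (f x).length = S) →
      (L.flatMap f).getD k d = (f (L.getD (k / S) dα)).getD (k % S) d := by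
  intro L
  induction L with
  | nil => intro k hk _; simp at hk
  | cons x L ih =>
      intro k hk h
      have hfx : (f x).length = S := h x List.mem_cons_self
      simp only [List.flatMap_cons]
      by_cases hks : k < S
      · rw [List.getD_append _ _ _ _ (by rw [hfx]; exact hks),
          Nat.div_eq_of_lt hks, Nat.mod_eq_of_lt hks]
        rfl
      · push_neg at hks
        have hk' : k - S < L.length * S := by
          have hmul : (x :: L).length * S = L.length * S + S := by
            simp [List.length_cons]; ring
          rw [hmul] at hk
          omega
        rw [List.getD_append_right _ _ _ _ (by rw [hfx]; exact hks), hfx,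
          ih (k - S) hk' (fun y hy => h y (List.mem_cons_of_mem _ hy)),
          Nat.div_eq_sub_div (by omega) hks, Nat.mod_eq_sub_mod hks]
        rfl

theorem getD_map_range' {α : Type} (f : Nat → α) (n k : Nat) (d : α) (hk : k < n) :
    ((List.range n).map f).getD k d = f k := by
  rw [List.getD_eq_getElem _ _ (by simpa using hk)]
  simp

theorem getD_take_drop {α : Type} (xs : List α) (a m k : Nat) (d : α) (hk : k < m)
    (h : a + m ≤ xs.length) :
    ((xs.drop a).take m).getD k d = xs.getD (a + k) d := by
  rw [List.getD_eq_getElem _ _ (by simp; omega), List.getD_eq_getElem _ _ (by omega)]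
  simp [List.getElem_take, List.getElem_drop]

theorem length_take_drop {α : Type} (xs : List α) (a m : Nat) (h : a + m ≤ xs.length) :
    ((xs.drop a).take m).length = m := by
  simp; omega

theorem getD_replicate' {α : Type} (n k : Nat) (x d : α) (hk : k < n) :
    (List.replicate n x).getD k d = x := by
  rw [List.getD_eq_getElem _ _ (by simpa using hk), List.getElem_replicate]

-- characterization of A
theorem r8_eq_flat (p : List (List Int)) (l : Int) (Sn Cn : Nat)
    (hSn : (2 : Int) ^ l.toNat = (Sn : Int)) (hS : 0 < Sn) (hC : Cn = p.length / Sn) :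
    r8 p l = (quadList (PySem.List.pyRange 0 (Cn : Int) 1) (PySem.List.pyRange 0 (Sn : Int) 1)).foldl
      (fun a u => setCell a (u.1.1.1 * (Sn : Int) + u.1.2) (u.1.1.2 * (Sn : Int) + u.2)
        (getCell p (u.1.1.2 * (Sn : Int) + u.1.2) (((Cn : Int) - 1 - u.1.1.1) * (Sn : Int) + u.2)))
      (List.replicate p.length (List.replicate p.length 0)) := by
  have hCast : PySem.Int.floordiv (p.length : Int) ((2 : Int) ^ l.toNat) = ((Cn : Nat) : Int) := by
    rw [hSn, PySem.Int.floordiv_natCast, ← hC]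
  simp only [r8, hCast]
  simp only [hSn]
  exact quad_fold_eq _ _ _ _

theorem quad_nonneg (Cn Sn : Nat) :
    ∀ u ∈ quadList (PySem.List.pyRange 0 (Cn : Int) 1) (PySem.List.pyRange 0 (Sn : Int) 1),
      0 ≤ u.1.1.1 * (Sn : Int) + u.1.2 ∧ 0 ≤ u.1.1.2 * (Sn : Int) + u.2 := by
  intro u hu
  rw [mem_quadList] at hu
  obtain ⟨h1, h2, h3, h4⟩ := hu
  rw [PySem.List.mem_pyRange_one] at h1 h2 h3 h4
  constructor
  · exact add_nonneg (mul_nonneg h1.1 (Int.natCast_nonneg _)) h3.1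
  · exact add_nonneg (mul_nonneg h2.1 (Int.natCast_nonneg _)) h4.1

theorem quad_target_lt (Cn Sn : Nat) :
    ∀ u ∈ quadList (PySem.List.pyRange 0 (Cn : Int) 1) (PySem.List.pyRange 0 (Sn : Int) 1),
      u.1.1.1 * (Sn : Int) + u.1.2 < ((Cn * Sn : Nat) : Int) ∧
      u.1.1.2 * (Sn : Int) + u.2 < ((Cn * Sn : Nat) : Int) := by
  intro u hu
  rw [mem_quadList] at hu
  obtain ⟨h1, h2, h3, h4⟩ := hu
  rw [PySem.List.mem_pyRange_one] at h1 h2 h3 h4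
  have key : ∀ i x : Int, 0 ≤ i → i < (Cn : Int) → 0 ≤ x → x < (Sn : Int) →
      i * (Sn : Int) + x < ((Cn * Sn : Nat) : Int) := by
    intro i x hi0 hiC hx0 hxS
    have h5 : (i + 1) * (Sn : Int) ≤ (Cn : Int) * (Sn : Int) :=
      mul_le_mul_of_nonneg_right (by omega) (Int.natCast_nonneg _)
    have h6 : i * (Sn : Int) + x < (i + 1) * (Sn : Int) := by
      have : (i + 1) * (Sn : Int) = i * (Sn : Int) + (Sn : Int) := by ring
      rw [this]
      linarith
    have h7 : ((Cn * Sn : Nat) : Int) = (Cn : Int) * (Sn : Int) := by push_cast; ring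
    rw [h7]
    linarith
  exact ⟨key _ _ h1.1 h1.2 h3.1 h3.2, key _ _ h2.1 h2.2 h4.1 h4.2⟩

theorem A_len (p : List (List Int)) (l : Int) (Sn Cn : Nat)
    (hSn : (2 : Int) ^ l.toNat = (Sn : Int)) (hS : 0 < Sn) (hC : Cn = p.length / Sn) :
    (r8 p l).length = p.length := by
  rw [r8_eq_flat p l Sn Cn hSn hS hC]
  exact (foldl_setCell_length _ _ _ _ _).trans (List.length_replicate)

theorem A_rowlen (p : List (List Int)) (l : Int) (Sn Cn : Nat)
    (hSn : (2 : Int) ^ l.toNat = (Sn : Int)) (hS : 0 < Sn) (hC : Cn = p.length / Sn)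
    (k : Nat) (hk : k < p.length) :
    ((r8 p l).getD k []).length = p.length := by
  rw [r8_eq_flat p l Sn Cn hSn hS hC]
  have h := foldl_setCell_rowlen
    (fun u : ((Int × Int) × Int) × Int => u.1.1.1 * (Sn : Int) + u.1.2)
    (fun u => u.1.1.2 * (Sn : Int) + u.2)
    (fun u => getCell p (u.1.1.2 * (Sn : Int) + u.1.2) (((Cn : Int) - 1 - u.1.1.1) * (Sn : Int) + u.2))
    (k : Int) (Int.natCast_nonneg k) _
    (List.replicate p.length (List.replicate p.length 0)) (quad_nonneg Cn Sn)
  rw [PySem.List.pyGetD_natCast, PySem.List.pyGetD_natCast] at h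
  rw [h, List.getD_eq_getElem _ _ (by simpa using hk), List.getElem_replicate,
    List.length_replicate]

theorem A_get (p : List (List Int)) (l : Int) (Sn Cn : Nat) (hSn : (2 : Int) ^ l.toNat = (Sn : Int))
    (hS : 0 < Sn) (hC : Cn = p.length / Sn) (r c : Nat) (hr : r < Cn * Sn) (hc : c < Cn * Sn) :
    ((r8 p l).getD r []).getD c 0 = cellVal p Sn Cn r c := by
  have hmn : Cn * Sn ≤ p.length := hC ▸ Nat.div_mul_le_self _ _
  have hrn : r < p.length := lt_of_lt_of_le hr hmn
  have hcn : c < p.length := lt_of_lt_of_le hc hmn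
  have hdr : r / Sn < Cn := (Nat.div_lt_iff_lt_mul hS).mpr hr
  have hdc : c / Sn < Cn := (Nat.div_lt_iff_lt_mul hS).mpr hc
  have key : ((r8 p l).getD r []).getD c 0 = getCell (r8 p l) (r : Int) (c : Int) := by
    simp [getCell]
  rw [key, r8_eq_flat p l Sn Cn hSn hS hC]
  refine (getCell_foldl_unique _ _ _ (r : Int) (c : Int)
      (Int.natCast_nonneg r) (Int.natCast_nonneg c) _ _
      ⟨⟨⟨((r / Sn : Nat) : Int), ((c / Sn : Nat) : Int)⟩, ((r % Sn : Nat) : Int)⟩, ((c % Sn : Nat) : Int)⟩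
      ?_ (quad_nonneg Cn Sn) ?_ ?_ ?_).trans ?_
  · rw [mem_quadList]
    refine ⟨?_, ?_, ?_, ?_⟩ <;> dsimp only <;> rw [PySem.List.mem_pyRange_one] <;>
      (constructor; · exact Int.natCast_nonneg _)
    · show ((r / Sn : Nat) : Int) < ((Cn : Nat) : Int); exact_mod_cast hdr
    · show ((c / Sn : Nat) : Int) < ((Cn : Nat) : Int); exact_mod_cast hdc
    · show ((r % Sn : Nat) : Int) < ((Sn : Nat) : Int); exact_mod_cast Nat.mod_lt _ hS
    · show ((c % Sn : Nat) : Int) < ((Sn : Nat) : Int); exact_mod_cast Nat.mod_lt _ hS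
  · intro u hu
    rw [mem_quadList] at hu
    obtain ⟨⟨⟨i, j⟩, x⟩, y⟩ := u
    dsimp only at hu ⊢
    obtain ⟨h1, h2, h3, h4⟩ := hu
    rw [PySem.List.mem_pyRange_one] at h1 h2 h3 h4
    simp only [Prod.mk.injEq]
    constructor
    · rintro ⟨e1, e2⟩
      have hi : i = ((i.toNat : Nat) : Int) := by omega
      have hj : j = ((j.toNat : Nat) : Int) := by omega
      have hx : x = ((x.toNat : Nat) : Int) := by omega
      have hy : y = ((y.toNat : Nat) : Int) := by omega
      have e1n : i.toNat * Sn + x.toNat = r := by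
        rw [hi, hx] at e1; exact_mod_cast e1
      have e2n : j.toNat * Sn + y.toNat = c := by
        rw [hj, hy] at e2; exact_mod_cast e2
      have e1' : x.toNat + Sn * i.toNat = r := by
        rw [Nat.mul_comm]; exact (Nat.add_comm _ _).trans e1n
      have e2' : y.toNat + Sn * j.toNat = c := by
        rw [Nat.mul_comm]; exact (Nat.add_comm _ _).trans e2n
      have hxb : x.toNat < Sn := by omega
      have hyb : y.toNat < Sn := by omega
      have hdm1 := (Nat.div_mod_unique hS).mpr ⟨e1', hxb⟩
      have hdm2 := (Nat.div_mod_unique hS).mpr ⟨e2', hyb⟩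
      refine ⟨⟨⟨?_, ?_⟩, ?_⟩, ?_⟩ <;> omega
    · rintro ⟨⟨⟨rfl, rfl⟩, rfl⟩, rfl⟩
      constructor <;> exact_mod_cast Nat.div_add_mod' _ _
  · simpa using hrn
  · rw [PySem.List.pyGetD_natCast,
      List.getD_eq_getElem _ _ (by simpa using hrn), List.getElem_replicate]
    simpa using hcn
  · show getCell p (((c / Sn : Nat) : Int) * (Sn : Int) + ((r % Sn : Nat) : Int))
        (((Cn : Int) - 1 - ((r / Sn : Nat) : Int)) * (Sn : Int) + ((c % Sn : Nat) : Int))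
      = cellVal p Sn Cn r c
    have hcast1 : (((c / Sn : Nat) : Int) * (Sn : Int) + ((r % Sn : Nat) : Int))
        = (((c / Sn) * Sn + r % Sn : Nat) : Int) := by push_cast; ring
    have hsub : ((Cn - 1 - r / Sn : Nat) : Int) = (Cn : Int) - 1 - ((r / Sn : Nat) : Int) := by
      omega
    have hcast2 : (((Cn : Int) - 1 - ((r / Sn : Nat) : Int)) * (Sn : Int) + ((c % Sn : Nat) : Int))
        = (((Cn - 1 - r / Sn) * Sn + c % Sn : Nat) : Int) := by
      rw [← hsub]; push_cast; ring
    rw [hcast1, hcast2]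
    unfold getCell cellVal
    rw [PySem.List.pyGetD_natCast, PySem.List.pyGetD_natCast]

theorem A_get_zero (p : List (List Int)) (l : Int) (Sn Cn : Nat)
    (hSn : (2 : Int) ^ l.toNat = (Sn : Int)) (hS : 0 < Sn) (hC : Cn = p.length / Sn)
    (r c : Nat) (hr : r < p.length) (hc : c < p.length)
    (hout : Cn * Sn ≤ r ∨ Cn * Sn ≤ c) :
    ((r8 p l).getD r []).getD c 0 = 0 := by
  have key : ((r8 p l).getD r []).getD c 0 = getCell (r8 p l) (r : Int) (c : Int) := by
    simp [getCell]
  rw [key, r8_eq_flat p l Sn Cn hSn hS hC]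
  rw [getCell_foldl_no_target _ _ _ (r : Int) (c : Int)
    (Int.natCast_nonneg r) (Int.natCast_nonneg c) _ _ ?_]
  · unfold getCell
    rw [PySem.List.pyGetD_natCast, PySem.List.pyGetD_natCast,
      getD_replicate' _ _ _ _ hr, getD_replicate' _ _ _ _ hc]
  · intro u hu
    refine ⟨(quad_nonneg Cn Sn u hu).1, (quad_nonneg Cn Sn u hu).2, ?_⟩
    have hlt := quad_target_lt Cn Sn u hu
    rintro ⟨e1, e2⟩
    rcases hout with h | h
    · rw [e1] at hlt
      have : ((Cn * Sn : Nat) : Int) ≤ (r : Nat) := by exact_mod_cast h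
      omega
    · rw [e2] at hlt
      have : ((Cn * Sn : Nat) : Int) ≤ (c : Nat) := by exact_mod_cast h
      omega

theorem list_eq_of_getD {α : Type} (d : α) (l1 l2 : List α) (hlen : l1.length = l2.length)
    (h : ∀ k, k < l1.length → l1.getD k d = l2.getD k d) : l1 = l2 := by
  apply List.ext_getElem hlen
  intro k hk1 hk2
  have := h k hk1
  rwa [List.getD_eq_getElem _ _ hk1, List.getD_eq_getElem _ _ hk2] at this

-- characterization of B
theorem cast_slice {α : Type} (xs : List α) (a S : Nat) :
    PySem.List.slice xs (some ((a : Int) * (S : Int))) (some (((a : Int) + 1) * (S : Int)))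
      = (xs.drop (a * S)).take S := by
  have h1 : ((a : Int) * (S : Int)) = ((a * S : Nat) : Int) := by push_cast; ring
  have h2 : (((a : Int) + 1) * (S : Int)) = ((a * S : Nat) : Int) + ((S : Nat) : Int) := by
    push_cast; ring
  rw [h1, h2, PySem.List.slice_natCast_add]

theorem tile_eval (p : List (List Int)) (Sn : Nat) (j b x : Nat)
    (hlen1 : j * Sn + Sn ≤ p.length) (hx : x < Sn) :
    (((p.drop (j * Sn)).take Sn).map (fun row => (row.drop (b * Sn)).take Sn)).getD x ([] : List Int)
      = ((p.getD (j * Sn + x) []).drop (b * Sn)).take Sn := by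
  have hxlen : x < ((p.drop (j * Sn)).take Sn).length := by
    rw [length_take_drop _ _ _ hlen1]; exact hx
  rw [List.getD_eq_getElem _ _ (by simpa using hxlen), List.getElem_map]
  congr 1
  rw [List.getElem_take, List.getElem_drop, List.getD_eq_getElem _ _ (by omega)]

theorem B_shape (p : List (List Int)) (l : Int) (Sn Cn : Nat) (hSn : (2 : Int) ^ l.toNat = (Sn : Int))
    (hS : 0 < Sn) (hC : Cn = p.length / Sn)
    (hrows : ∀ row ∈ p.take (Cn * Sn), Cn * Sn ≤ row.length) :
    (r8_alt p l).length = p.length ∧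
    (∀ r : Nat, r < p.length → ((r8_alt p l).getD r []).length = p.length) ∧
    (∀ r c : Nat, r < Cn * Sn → c < Cn * Sn →
      ((r8_alt p l).getD r []).getD c 0 = cellVal p Sn Cn r c) ∧
    (∀ r c : Nat, r < p.length → c < p.length → (Cn * Sn ≤ r ∨ Cn * Sn ≤ c) →
      ((r8_alt p l).getD r []).getD c 0 = 0) := by
  have hmn : Cn * Sn ≤ p.length := hC ▸ Nat.div_mul_le_self _ _
  have hCast2 : PySem.Int.floordiv (p.length : Int) ((Sn : Nat) : Int) = ((Cn : Nat) : Int) := by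
    rw [PySem.Int.floordiv_natCast, ← hC]
  have hmm : ((Cn : Int) * (Sn : Int)) = ((Cn * Sn : Nat) : Int) := by push_cast; ring
  have hform : r8_alt p l = (List.range p.length).map (fun r =>
      if r < Cn * Sn then
        (((List.range Cn).map (fun i => (List.range Cn).map (fun j =>
            ((p.drop (j * Sn)).take Sn).map (fun row =>
              (row.drop ((Cn - 1 - i) * Sn)).take Sn)))).flatMap
          (fun blockRow => (List.range Sn).map (fun x =>
            blockRow.flatMap (fun blk => blk.getD x [])))).getD r []
          ++ List.replicate (p.length - Cn * Sn) 0
      else List.replicate p.length 0) := by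
    simp only [r8_alt, hSn, hCast2]
    rw [show PySem.List.pyRange 0 ((p.length : Nat) : Int) 1
        = (List.range p.length).map (fun (k : Nat) => (k : Int)) from PySem.List.pyRange_zero_natCast _,
      List.map_map]
    apply List.map_congr_left
    intro r hr
    rw [List.mem_range] at hr
    simp only [Function.comp_def, hmm]
    by_cases hrm : r < Cn * Sn
    · rw [if_pos (by exact_mod_cast hrm), if_pos hrm, PySem.List.pyGetD_natCast]
      congr 2
      · simp only [PySem.List.pyRange_zero_natCast, List.map_map,
          cast_slice, PySem.List.pyGetD_natCast, Function.comp_def]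
        congr 1
        apply List.map_congr_left
        intro i hi
        rw [List.mem_range] at hi
        apply List.map_congr_left
        intro j hj
        rw [List.mem_range] at hj
        rw [getD_map_range' _ _ _ _ hj,
          show ((Cn : Int) - 1 - (i : Int)) = ((Cn - 1 - i : Nat) : Int) by omega,
          PySem.List.pyGetD_natCast, getD_map_range' _ _ _ _ (by omega : Cn - 1 - i < Cn)]
      · omega
    · rw [if_neg (by exact_mod_cast hrm), if_neg hrm]
      simp
  have hrowbig : ∀ idx : Nat, idx < Cn * Sn → Cn * Sn ≤ (p.getD idx []).length := by
    intro idx hidx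
    have hidx' : idx < p.length := lt_of_lt_of_le hidx hmn
    have hlt : idx < (p.take (Cn * Sn)).length := by
      simp [List.length_take]; omega
    have hmem := List.getElem_mem hlt
    rw [List.getElem_take] at hmem
    rw [List.getD_eq_getElem _ _ hidx']
    exact hrows _ hmem
  have hbound : ∀ i : Nat, i < Cn → (Cn - 1 - i) * Sn + Sn ≤ Cn * Sn := by
    intro i hi
    calc (Cn - 1 - i) * Sn + Sn = ((Cn - 1 - i) + 1) * Sn := by ring
      _ ≤ Cn * Sn := Nat.mul_le_mul_right _ (by omega)
  have hjbound : ∀ j x : Nat, j < Cn → x < Sn → j * Sn + x < Cn * Sn := by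
    intro j x hj hx
    calc j * Sn + x < j * Sn + Sn := by omega
      _ = (j + 1) * Sn := by ring
      _ ≤ Cn * Sn := Nat.mul_le_mul_right _ hj
  have hjlen : ∀ j : Nat, j < Cn → j * Sn + Sn ≤ p.length := by
    intro j hj
    calc j * Sn + Sn = (j + 1) * Sn := by ring
      _ ≤ Cn * Sn := Nat.mul_le_mul_right _ hj
      _ ≤ p.length := hmn
  have hpiece : ∀ i : Nat, i < Cn → ∀ x : Nat, x < Sn →
      ∀ blk ∈ (List.range Cn).map (fun j =>
          ((p.drop (j * Sn)).take Sn).map (fun row => (row.drop ((Cn - 1 - i) * Sn)).take Sn)),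
        ((blk.getD x ([] : List Int)).length = Sn) := by
    intro i hi x hx blk hblk
    obtain ⟨j, hj, rfl⟩ := List.mem_map.mp hblk
    rw [List.mem_range] at hj
    rw [tile_eval p Sn j _ x (hjlen j hj) hx,
      length_take_drop _ _ _ (le_trans (hbound i hi)
        (hrowbig _ (hjbound j x hj hx)))]
  have hcorerow : ∀ r : Nat, r < Cn * Sn →
      (((List.range Cn).map (fun i => (List.range Cn).map (fun j =>
          ((p.drop (j * Sn)).take Sn).map (fun row =>
            (row.drop ((Cn - 1 - i) * Sn)).take Sn)))).flatMap
        (fun blockRow => (List.range Sn).map (fun x =>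
          blockRow.flatMap (fun blk => blk.getD x [])))).getD r ([] : List Int)
      = ((List.range Cn).map (fun j => ((p.drop (j * Sn)).take Sn).map (fun row =>
          (row.drop ((Cn - 1 - r / Sn) * Sn)).take Sn))).flatMap
            (fun blk => blk.getD (r % Sn) []) := by
    intro r hr
    have hi : r / Sn < Cn := (Nat.div_lt_iff_lt_mul hS).mpr hr
    rw [getD_flatMap_uniform _ Sn hS ([] : List (List (List Int))) ([] : List Int) _ r
        (by simpa using hr) (fun x hx => by simp),
      getD_map_range' _ _ _ _ hi, getD_map_range' _ _ _ _ (Nat.mod_lt _ hS)]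
  have hcorelen : ∀ r : Nat, r < Cn * Sn →
      ((((List.range Cn).map (fun i => (List.range Cn).map (fun j =>
          ((p.drop (j * Sn)).take Sn).map (fun row =>
            (row.drop ((Cn - 1 - i) * Sn)).take Sn)))).flatMap
        (fun blockRow => (List.range Sn).map (fun x =>
          blockRow.flatMap (fun blk => blk.getD x [])))).getD r ([] : List Int)).length
      = Cn * Sn := by
    intro r hr
    have hi : r / Sn < Cn := (Nat.div_lt_iff_lt_mul hS).mpr hr
    rw [hcorerow r hr,
      length_flatMap_uniform _ Sn _ (hpiece (r / Sn) hi (r % Sn) (Nat.mod_lt _ hS))]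
    simp
  have hcorecell : ∀ r c : Nat, r < Cn * Sn → c < Cn * Sn →
      ((((List.range Cn).map (fun i => (List.range Cn).map (fun j =>
          ((p.drop (j * Sn)).take Sn).map (fun row =>
            (row.drop ((Cn - 1 - i) * Sn)).take Sn)))).flatMap
        (fun blockRow => (List.range Sn).map (fun x =>
          blockRow.flatMap (fun blk => blk.getD x [])))).getD r ([] : List Int)).getD c 0
      = cellVal p Sn Cn r c := by
    intro r c hr hc
    have hi : r / Sn < Cn := (Nat.div_lt_iff_lt_mul hS).mpr hr
    have hj : c / Sn < Cn := (Nat.div_lt_iff_lt_mul hS).mpr hc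
    rw [hcorerow r hr,
      getD_flatMap_uniform _ Sn hS ([] : List (List Int)) (0 : Int) _ c
        (by simpa using hc) (hpiece (r / Sn) hi (r % Sn) (Nat.mod_lt _ hS)),
      getD_map_range' _ _ _ _ hj,
      tile_eval p Sn (c / Sn) _ (r % Sn) (hjlen _ hj) (Nat.mod_lt _ hS),
      getD_take_drop _ _ _ _ _ (Nat.mod_lt _ hS)
        (le_trans (hbound (r / Sn) hi)
          (hrowbig _ (hjbound (c / Sn) (r % Sn) hj (Nat.mod_lt _ hS))))]
    rfl
  have hrowval : ∀ r : Nat, r < p.length → (r8_alt p l).getD r ([] : List Int)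
      = if r < Cn * Sn then
          (((List.range Cn).map (fun i => (List.range Cn).map (fun j =>
              ((p.drop (j * Sn)).take Sn).map (fun row =>
                (row.drop ((Cn - 1 - i) * Sn)).take Sn)))).flatMap
            (fun blockRow => (List.range Sn).map (fun x =>
              blockRow.flatMap (fun blk => blk.getD x [])))).getD r []
            ++ List.replicate (p.length - Cn * Sn) 0
        else List.replicate p.length 0 := by
    intro r hr
    rw [hform, getD_map_range' _ _ _ _ hr]
  refine ⟨?_, ?_, ?_, ?_⟩
  · rw [hform]; simp
  · intro r hr
    rw [hrowval r hr]
    by_cases hrm : r < Cn * Sn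
    · rw [if_pos hrm, List.length_append, hcorelen r hrm, List.length_replicate]
      omega
    · rw [if_neg hrm, List.length_replicate]
  · intro r c hr hc
    rw [hrowval r (lt_of_lt_of_le hr hmn), if_pos hr,
      List.getD_append _ _ _ _ (by rw [hcorelen r hr]; exact hc)]
    exact hcorecell r c hr hc
  · intro r c hr hc hout
    rw [hrowval r hr]
    by_cases hrm : r < Cn * Sn
    · have hcm : Cn * Sn ≤ c := by omega
      rw [if_pos hrm,
        List.getD_append_right _ _ _ _ (by rw [hcorelen r hrm]; exact hcm),
        hcorelen r hrm, getD_replicate' _ _ _ _ (by omega)]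
    · rw [if_neg hrm, getD_replicate' _ _ _ _ hc]

-- ===== VERDICT (by name: the statement is the Claim_ definition above) =====
theorem r8_spec : Claim_equal_r8 := by
  intro p l _ hpre
  obtain ⟨hl, hrows⟩ := hpre
  unfold Spec_r8
  set Sn : Nat := 2 ^ l.toNat with hSn'
  have hS : 0 < Sn := Nat.two_pow_pos _
  set Cn : Nat := p.length / Sn with hC
  have hSn : (2 : Int) ^ l.toNat = (Sn : Int) := by push_cast [hSn']; ring
  have hmn : Cn * Sn ≤ p.length := hC ▸ Nat.div_mul_le_self _ _
  obtain ⟨hBlen, hBrow, hBcell, hBzero⟩ := B_shape p l Sn Cn hSn hS hC hrows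
  apply list_eq_of_getD ([] : List Int)
  · rw [A_len p l Sn Cn hSn hS hC, hBlen]
  · intro r hrlen
    have hr : r < p.length := by rwa [A_len p l Sn Cn hSn hS hC] at hrlen
    apply list_eq_of_getD (0 : Int)
    · rw [A_rowlen p l Sn Cn hSn hS hC r hr, hBrow r hr]
    · intro c hclen
      have hc : c < p.length := by rwa [A_rowlen p l Sn Cn hSn hS hC r hr] at hclen
      by_cases hrm : r < Cn * Sn
      · by_cases hcm : c < Cn * Sn
        · rw [A_get p l Sn Cn hSn hS hC r c hrm hcm, hBcell r c hrm hcm]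
        · rw [A_get_zero p l Sn Cn hSn hS hC r c hr hc (by omega),
            hBzero r c hr hc (by omega)]
      · rw [A_get_zero p l Sn Cn hSn hS hC r c hr hc (by omega),
          hBzero r c hr hc (by omega)]
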